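-- pv_equiv track=rewrite | github.com/stephaniebernhard/adventofcode | 2023/day11p2.py | get_horizontal_indices
-- ===== SOURCE A (Python) =====
-- def get_horizontal_indices(input):
--     add_indices = []
--     for pos in range(len(input[0])):
--         count = 0
--         for line in range(len(input)):
--             if input[line][pos] == '.':
--                 count = count + 1
--         if count == len(input):
--             add_indices.append(pos)
--     return add_indices
-- ===== SOURCE B (Python) =====
-- def get_horizontal_indices(input):
--     cols = len(input[0])
--     still_all_dots = [True] * cols
--     for row in input:
--         for pos in range(cols):
--             if row[pos] != '.':
--                 still_all_dots[pos] = False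
--     return [i for i in range(cols) if still_all_dots[i]]
-- ===== Notes on version B (the rewrite author's own statement) =====
-- stated objective: alternative
-- what changed: Replaces the column-major per-column dot count (count == len(input) test) with a single row-major pass maintaining a boolean disqualification table per column, then collecting the surviving column indices.
import Mathlib
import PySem

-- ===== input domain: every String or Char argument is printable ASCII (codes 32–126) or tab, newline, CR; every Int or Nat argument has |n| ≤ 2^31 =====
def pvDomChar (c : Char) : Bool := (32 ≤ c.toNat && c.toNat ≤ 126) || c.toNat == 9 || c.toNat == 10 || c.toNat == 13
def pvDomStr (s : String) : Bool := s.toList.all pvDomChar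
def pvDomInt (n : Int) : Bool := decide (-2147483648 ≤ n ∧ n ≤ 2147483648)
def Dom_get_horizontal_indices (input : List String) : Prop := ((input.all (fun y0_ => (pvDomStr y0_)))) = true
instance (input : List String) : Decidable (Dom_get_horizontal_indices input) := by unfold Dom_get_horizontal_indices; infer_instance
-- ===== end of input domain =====

-- B replaces A's column-major per-column dot count with a row-major pass over a boolean
-- disqualification table; same asymptotic cost, different traversal (objective: alternative).


-- ===== PORT A =====
def get_horizontal_indices (input : List String) : List Int :=
  (PySem.List.pyRange 0 (PySem.Str.len ((PySem.List.pyGet? input 0).getD "")) 1).foldl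
    (fun add_indices pos =>
      let count : Int :=
        (PySem.List.pyRange 0 (input.length : Int) 1).foldl
          (fun count line =>
            if (PySem.Str.pyGet? ((PySem.List.pyGet? input line).getD "") pos).getD ' ' == '.' then
              count + 1
            else count) 0
      if count == (input.length : Int) then add_indices ++ [pos] else add_indices) []

-- ===== PORT B =====
def get_horizontal_indices_alt (input : List String) : List Int :=
  let cols : Int := PySem.Str.len ((PySem.List.pyGet? input 0).getD "")
  let still_all_dots : List Bool :=
    input.foldl
      (fun st row =>
        (PySem.List.pyRange 0 cols 1).foldl
          (fun st pos =>
            if !((PySem.Str.pyGet? row pos).getD ' ' == '.') then st.set pos.toNat false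
            else st) st)
      (List.replicate cols.toNat true)
  (PySem.List.pyRange 0 cols 1).filter (fun i => still_all_dots.getD i.toNat false)

-- ===== PRECONDITION & SPEC =====
-- A raises IndexError when input is empty (input[0]) or when some line is shorter than the
-- first line (input[line][pos]); exactly those inputs are excluded (B raises there too).
def Pre_get_horizontal_indices (input : List String) : Prop :=
  input ≠ [] ∧ ∀ s ∈ input, PySem.Str.len (input.headD "") ≤ PySem.Str.len s
instance (input : List String) : Decidable (Pre_get_horizontal_indices input) := by
  unfold Pre_get_horizontal_indices; infer_instance
def pvWitness_get_horizontal_indices : List String := ["#.", ".."]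
def Spec_get_horizontal_indices (input : List String) (out : List Int) : Prop := out = get_horizontal_indices_alt input
instance (input : List String) (out : List Int) : Decidable (Spec_get_horizontal_indices input out) := by unfold Spec_get_horizontal_indices; infer_instance

-- ===== CLAIM (what is proved, stated in full; the proofs are below) =====
def Claim_equal_get_horizontal_indices : Prop := ∀ (input : List String), Dom_get_horizontal_indices input → Pre_get_horizontal_indices input → Spec_get_horizontal_indices input (get_horizontal_indices input)

-- ===== LEMMAS AND PROOFS =====

-- "input[line][pos] == '.'" as a predicate on the row
def pvDot (row : String) (pos : Int) : Bool :=
  (PySem.Str.pyGet? row pos).getD ' ' == '.'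

-- A's per-column test equals "every row has a dot at pos" (out-of-range reads default to ' ')
lemma pvA_pred (input : List String) (pos : Int) :
    (((PySem.List.pyRange 0 (input.length : Int) 1).foldl
        (fun count line =>
          if (PySem.Str.pyGet? ((PySem.List.pyGet? input line).getD "") pos).getD ' ' == '.' then
            count + 1
          else count) 0 : Int) == (input.length : Int))
      = input.all (fun row => pvDot row pos) := by
  rw [PySem.List.foldl_if_add_one]
  rw [PySem.List.pyRange_zero_natCast]
  rw [List.countP_map]
  have hmap : (List.range input.length).map (fun k => input.getD k "") = input := by
    apply List.ext_getElem (by simp)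
    intro i h1 h2
    simp [List.getD_eq_getElem?_getD, List.getElem?_eq_getElem h2]
  have h : (List.range input.length).countP
      ((fun line => (PySem.Str.pyGet? ((PySem.List.pyGet? input line).getD "") pos).getD ' ' == '.') ∘ (fun k : Nat => (k : Int)))
      = input.countP (fun row => pvDot row pos) := by
    conv_rhs => rw [← hmap]
    rw [List.countP_map]
    apply List.countP_congr
    intro k _
    simp [pvDot, PySem.List.pyGet?_natCast, List.getD_eq_getElem?_getD]
  rw [h]
  rcases Bool.eq_false_or_eq_true (input.all (fun row => pvDot row pos)) with ht | ht <;> rw [ht]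
  · rw [List.countP_eq_length.mpr (fun a ha => List.all_eq_true.mp ht a ha)]
    simp
  · rw [Bool.eq_false_iff]
    simp only [ne_eq, zero_add, beq_iff_eq, Nat.cast_inj]
    intro he
    obtain ⟨x, hx, hpx⟩ := List.all_eq_false.mp ht
    exact hpx (List.countP_eq_length.mp he x hx)

-- B's folds preserve the table length
lemma pvFold_set_length (row : String) (l : List Int) (st : List Bool) :
    (l.foldl
        (fun st pos =>
          if !((PySem.Str.pyGet? row pos).getD ' ' == '.') then st.set pos.toNat false else st)
        st).length = st.length := by
  induction l generalizing st with
  | nil => rfl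
  | cons x xs ih =>
    simp only [List.foldl_cons]
    split
    · rw [ih, List.length_set]
    · rw [ih]

-- B's inner (one-row) fold, elementwise
lemma pvInner_getElem? (row : String) (n : Nat) (st : List Bool) (k : Nat) :
    ((PySem.List.pyRange 0 (n : Int) 1).foldl
        (fun st pos =>
          if !((PySem.Str.pyGet? row pos).getD ' ' == '.') then st.set pos.toNat false else st)
        st)[k]?
      = if k < n then st[k]?.map (· && pvDot row (k : Int)) else st[k]? := by
  induction n generalizing k with
  | zero => simp
  | succ m ih =>
    have hr : PySem.List.pyRange 0 ((m+1 : Nat) : Int) 1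
        = PySem.List.pyRange 0 (m : Int) 1 ++ [(m : Int)] := by
      push_cast
      exact PySem.List.pyRange_one_succ_right (by omega)
    rw [hr, List.foldl_append]
    simp only [List.foldl_cons, List.foldl_nil]
    by_cases hd : pvDot row (m : Int)
    · rw [show (!((PySem.Str.pyGet? row (m : Int)).getD ' ' == '.')) = false by
        simpa [pvDot] using hd]
      simp only [Bool.false_eq_true, if_false]
      rw [ih k]
      rcases lt_trichotomy k m with h | h | h
      · rw [if_pos h, if_pos (by omega)]
      · subst h
        rw [if_neg (by omega), if_pos (by omega)]
        cases hs : st[k]? <;> simp [hd]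
      · rw [if_neg (by omega), if_neg (by omega)]
    · rw [show (!((PySem.Str.pyGet? row (m : Int)).getD ' ' == '.')) = true by
        simpa [pvDot] using hd]
      simp only [if_true]
      rw [List.getElem?_set, Int.toNat_natCast]
      rcases lt_trichotomy k m with h | h | h
      · rw [if_neg (by omega), ih k, if_pos h, if_pos (by omega)]
      · subst h
        rw [pvFold_set_length]
        by_cases hk : k < st.length
        · rw [if_pos rfl, if_pos hk, if_pos (by omega)]
          have hb : pvDot row (k : Int) = false := by simpa using hd
          rw [List.getElem?_eq_getElem hk]
          simp [hb]
        · rw [if_pos rfl, if_neg hk, if_pos (by omega)]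
          rw [List.getElem?_eq_none (by omega)]
          rfl
      · rw [if_neg (by omega), ih k, if_neg (by omega), if_neg (by omega)]

-- B's outer fold, elementwise: a column survives iff every row seen has a dot there
lemma pvOuter_getElem? (rows : List String) (n : Nat) (st : List Bool) (k : Nat) :
    ((rows.foldl
        (fun st row =>
          (PySem.List.pyRange 0 (n : Int) 1).foldl
            (fun st pos =>
              if !((PySem.Str.pyGet? row pos).getD ' ' == '.') then st.set pos.toNat false else st)
            st) st))[k]?
      = if k < n then st[k]?.map (· && rows.all (fun row => pvDot row (k : Int))) else st[k]? := by
  induction rows generalizing st with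
  | nil =>
    simp only [List.foldl_nil, List.all_nil, Bool.and_true]
    split <;> [skip; rfl]
    cases st[k]? <;> rfl
  | cons r rs ih =>
    simp only [List.foldl_cons]
    rw [ih, pvInner_getElem?]
    by_cases hk : k < n
    · simp only [if_pos hk]
      cases st[k]? with
      | none => rfl
      | some b => simp [List.all_cons, Bool.and_assoc]
    · simp only [if_neg hk]

-- ===== VERDICT (by name: the statement is the Claim_ definition above) =====
theorem get_horizontal_indices_spec : Claim_equal_get_horizontal_indices := by
  intro input _ _
  unfold Spec_get_horizontal_indices
  unfold get_horizontal_indices get_horizontal_indices_alt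
  simp only []
  set cols : Int := PySem.Str.len ((PySem.List.pyGet? input 0).getD "") with hcols
  have hnn : 0 ≤ cols := by
    rw [hcols, PySem.Str.len_eq]
    positivity
  have hcast : cols = ((cols.toNat : Nat) : Int) := by omega
  rw [PySem.List.foldl_append_if_eq_filter]
  rw [List.nil_append]
  apply List.filter_congr
  intro i hi
  rw [PySem.List.mem_pyRange_one] at hi
  have hik : i = ((i.toNat : Nat) : Int) := by omega
  rw [pvA_pred]
  rw [hcast] at hi ⊢
  simp only [Int.toNat_natCast]
  have hget : (input.foldl
      (fun st row =>
        (PySem.List.pyRange 0 ((cols.toNat : Nat) : Int) 1).foldl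
          (fun st pos =>
            if !((PySem.Str.pyGet? row pos).getD ' ' == '.') then st.set pos.toNat false
            else st) st)
      (List.replicate cols.toNat true))[i.toNat]?
      = some (input.all (fun row => pvDot row ((i.toNat : Nat) : Int))) := by
    rw [pvOuter_getElem? input cols.toNat _ i.toNat]
    rw [if_pos (by omega)]
    rw [List.getElem?_replicate, if_pos (by omega)]
    simp
  rw [List.getD_eq_getElem?_getD, hget]
  rw [hik]
  rfl
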